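-- pv_equiv track=rewrite | github.com/AICardiologist/FoundationRelativity | paper 65/p65_compute.py | find_non_cyclic_cubics
-- ===== SOURCE A (Python) =====
-- import math
--
-- def is_perfect_square(n):
--     """Check if n is a perfect square."""
--     if n < 0:
--         return False
--     s = math.isqrt(n)
--     return s * s == n
--
-- def divisors(n):
--     """Return all positive divisors of n in sorted order."""
--     if n <= 0:
--         return []
--     divs = []
--     for i in range(1, math.isqrt(n) + 1):
--         if n % i == 0:
--             divs.append(i)
--             if i != n // i:
--                 divs.append(n // i)
--     return sorted(divs)
--
-- def disc_cubic(c2, c1, c0):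
--     """
--     Discriminant of monic cubic x^3 + c2*x^2 + c1*x + c0.
--     Formula: 18*c2*c1*c0 - 4*c2^3*c0 + c2^2*c1^2 - 4*c1^3 - 27*c0^2
--     """
--     return (18 * c2 * c1 * c0
--             - 4 * c2 * c2 * c2 * c0
--             + c2 * c2 * c1 * c1
--             - 4 * c1 * c1 * c1
--             - 27 * c0 * c0)
--
-- def has_rational_root(c2, c1, c0):
--     """Check if x^3 + c2*x^2 + c1*x + c0 has a rational root."""
--     if c0 == 0:
--         return True
--     for r in divisors(abs(c0)):
--         for sign in [1, -1]:
--             x = sign * r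
--             if x * x * x + c2 * x * x + c1 * x + c0 == 0:
--                 return True
--     return False
--
-- def find_non_cyclic_cubics(max_disc=1000, max_coeff=30):
--     """
--     Find irreducible totally real cubics x^3 + c2*x^2 + c1*x + c0 with:
--     - Positive discriminant (totally real)
--     - Non-square discriminant (S3 Galois group)
--     - Small coefficients
--     Returns one polynomial per distinct discriminant.
--     """
--     results = []
--
--     for c2 in [-1, 0, 1]:
--         for c1 in range(-max_coeff, max_coeff + 1):
--             for c0 in range(-max_coeff, max_coeff + 1):
--                 disc = disc_cubic(c2, c1, c0)
--                 if disc <= 0 or disc > max_disc: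
--                     continue
--                 if is_perfect_square(disc):
--                     continue
--                 if has_rational_root(c2, c1, c0):
--                     continue
--                 results.append((c2, c1, c0, disc))
--
--     results.sort(key=lambda x: (x[3], x[0], x[1], x[2]))
--
--     # One polynomial per discriminant
--     unique = []
--     seen = set()
--     for c2, c1, c0, disc in results:
--         if disc not in seen:
--             seen.add(disc)
--             unique.append((c2, c1, c0, disc))
--
--     return unique
-- ===== SOURCE B (Python) =====
-- import math
--
-- def is_perfect_square(n):
--     if n < 0:
--         return False
--     s = math.isqrt(n)
--     return s * s == n
--
-- def divisors(n):
--     if n <= 0: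
--         return []
--     divs = []
--     for i in range(1, math.isqrt(n) + 1):
--         if n % i == 0:
--             divs.append(i)
--             if i != n // i:
--                 divs.append(n // i)
--     return sorted(divs)
--
-- def disc_cubic(c2, c1, c0):
--     return (18 * c2 * c1 * c0
--             - 4 * c2 * c2 * c2 * c0
--             + c2 * c2 * c1 * c1
--             - 4 * c1 * c1 * c1
--             - 27 * c0 * c0)
--
-- def has_rational_root(c2, c1, c0):
--     if c0 == 0:
--         return True
--     for r in divisors(abs(c0)):
--         for sign in [1, -1]:
--             x = sign * r
--             if x * x * x + c2 * x * x + c1 * x + c0 == 0: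
--                 return True
--     return False
--
-- def find_non_cyclic_cubics(max_disc=1000, max_coeff=30):
--     # One dict pass: the triple loop runs in lexicographic (c2, c1, c0) order, so the
--     # first surviving triple for a discriminant is the lexicographically smallest one;
--     # keep it in a dict keyed by discriminant, then emit in increasing-discriminant order.
--     best = {}
--     for c2 in (-1, 0, 1):
--         for c1 in range(-max_coeff, max_coeff + 1):
--             for c0 in range(-max_coeff, max_coeff + 1):
--                 disc = disc_cubic(c2, c1, c0)
--                 if (0 < disc <= max_disc
--                         and disc not in best
--                         and not is_perfect_square(disc)
--                         and not has_rational_root(c2, c1, c0)):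
--                     best[disc] = (c2, c1, c0)
--     return [(c2, c1, c0, d) for d, (c2, c1, c0) in sorted(best.items())]
-- ===== Notes on version B (the rewrite author's own statement) =====
-- stated objective: simpler
-- what changed: Replaced A's append-everything list plus full 4-key sort plus seen-set dedup pass by a single dict keyed by discriminant that keeps the first (lexicographically smallest) surviving triple per discriminant during the enumeration, then emits the dict sorted by discriminant; the dict membership test also short-circuits the per-triple divisor search for discriminants already taken.
import Mathlib
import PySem

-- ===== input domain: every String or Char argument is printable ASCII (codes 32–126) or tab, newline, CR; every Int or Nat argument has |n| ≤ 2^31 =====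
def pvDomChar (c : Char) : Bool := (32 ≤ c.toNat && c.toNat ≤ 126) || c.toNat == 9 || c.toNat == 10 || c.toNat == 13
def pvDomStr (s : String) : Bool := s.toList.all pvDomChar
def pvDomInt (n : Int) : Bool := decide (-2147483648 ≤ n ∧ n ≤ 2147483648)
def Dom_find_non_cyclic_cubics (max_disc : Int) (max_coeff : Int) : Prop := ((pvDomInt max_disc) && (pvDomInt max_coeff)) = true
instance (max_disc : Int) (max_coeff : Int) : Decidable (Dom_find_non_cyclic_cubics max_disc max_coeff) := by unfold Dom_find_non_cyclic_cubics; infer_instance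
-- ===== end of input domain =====

-- B replaces A's append-all list + full 4-key sort + seen-set dedup pass by a dict keeping the
-- first (lexicographically smallest) surviving triple per discriminant, emitted sorted by key (simpler).

-- ===== PORT A =====
-- module helpers shared by A and B (is_perfect_square, divisors, disc_cubic, has_rational_root)
def pv_is_perfect_square (n : Int) : Bool :=
  if n < 0 then false
  else
    let s : Int := (Nat.sqrt n.toNat : Int)   -- math.isqrt(n), exact for n ≥ 0
    s * s == n

def pv_divisors (n : Int) : List Int :=
  if n ≤ 0 then []
  else
    let divs := (PySem.List.pyRange 1 ((Nat.sqrt n.toNat : Int) + 1) 1).foldl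
      (fun divs i =>
        if PySem.Int.mod n i == 0 then
          let divs := divs ++ [i]
          if i != PySem.Int.floordiv n i then divs ++ [PySem.Int.floordiv n i] else divs
        else divs) []
    PySem.List.sorted divs (fun x => x) false

def pv_disc_cubic (c2 c1 c0 : Int) : Int :=
  18 * c2 * c1 * c0 - 4 * c2 * c2 * c2 * c0 + c2 * c2 * c1 * c1 - 4 * c1 * c1 * c1 - 27 * c0 * c0

def pv_has_rational_root (c2 c1 c0 : Int) : Bool :=
  if c0 == 0 then true
  else
    (pv_divisors c0.natAbs).any (fun r =>
      ([1, -1] : List Int).any (fun sign =>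
        let x := sign * r
        x * x * x + c2 * x * x + c1 * x + c0 == 0))

-- Python's tuple key (x[3], x[0], x[1], x[2]) compared lexicographically
def pvKeyA (x : Int × Int × Int × Int) : Int ×ₗ (Int ×ₗ (Int ×ₗ Int)) :=
  toLex (x.2.2.2, toLex (x.1, toLex (x.2.1, x.2.2.1)))

def find_non_cyclic_cubics (max_disc : Int) (max_coeff : Int) : List (Int × Int × Int × Int) :=
  let results := ([-1, 0, 1] : List Int).foldl (fun results c2 =>
    (PySem.List.pyRange (-max_coeff) (max_coeff + 1) 1).foldl (fun results c1 =>
      (PySem.List.pyRange (-max_coeff) (max_coeff + 1) 1).foldl (fun results c0 =>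
        let disc := pv_disc_cubic c2 c1 c0
        if disc ≤ 0 ∨ disc > max_disc then results
        else if pv_is_perfect_square disc then results
        else if pv_has_rational_root c2 c1 c0 then results
        else results ++ [(c2, c1, c0, disc)]) results) results) []
  let results := PySem.List.sorted results pvKeyA false
  let uniqueSeen := results.foldl (fun (acc : List (Int × Int × Int × Int) × PySem.Set Int) x =>
      if PySem.Set.contains acc.2 x.2.2.2 then acc
      else (acc.1 ++ [x], PySem.Set.add acc.2 x.2.2.2)) ([], PySem.Set.empty)
  uniqueSeen.1

-- ===== PORT B =====
-- Python's comparison of the pairs (d, (c2, c1, c0)) from best.items(), lexicographic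
def pvKeyB (p : Int × (Int × Int × Int)) : Int ×ₗ (Int ×ₗ (Int ×ₗ Int)) :=
  toLex (p.1, toLex (p.2.1, toLex (p.2.2.1, p.2.2.2)))

def find_non_cyclic_cubics_alt (max_disc : Int) (max_coeff : Int) : List (Int × Int × Int × Int) :=
  let best : PySem.Dict Int (Int × Int × Int) := ([-1, 0, 1] : List Int).foldl (fun best c2 =>
    (PySem.List.pyRange (-max_coeff) (max_coeff + 1) 1).foldl (fun best c1 =>
      (PySem.List.pyRange (-max_coeff) (max_coeff + 1) 1).foldl (fun best c0 =>
        let disc := pv_disc_cubic c2 c1 c0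
        if 0 < disc ∧ disc ≤ max_disc ∧ best.contains disc = false
            ∧ pv_is_perfect_square disc = false ∧ pv_has_rational_root c2 c1 c0 = false
        then best.insert disc (c2, c1, c0) else best) best) best) PySem.Dict.empty
  (PySem.List.sorted best.items pvKeyB false).map (fun p => (p.2.1, p.2.2.1, p.2.2.2, p.1))

-- ===== PRECONDITION & SPEC =====
def Spec_find_non_cyclic_cubics (max_disc : Int) (max_coeff : Int) (out : List (Int × Int × Int × Int)) : Prop := out = find_non_cyclic_cubics_alt max_disc max_coeff
instance (max_disc : Int) (max_coeff : Int) (out : List (Int × Int × Int × Int)) : Decidable (Spec_find_non_cyclic_cubics max_disc max_coeff out) := by unfold Spec_find_non_cyclic_cubics; infer_instance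

-- ===== CLAIM (what is proved, stated in full; the proofs are below) =====
def Claim_equal_find_non_cyclic_cubics : Prop := ∀ (max_disc : Int) (max_coeff : Int), Dom_find_non_cyclic_cubics max_disc max_coeff → Spec_find_non_cyclic_cubics max_disc max_coeff (find_non_cyclic_cubics max_disc max_coeff)

-- ===== LEMMAS AND PROOFS =====

-- the discriminant, the survivor test, the enumeration, and the survivor list, as functions of triples
def pvD (t : Int × Int × Int) : Int := pv_disc_cubic t.1 t.2.1 t.2.2

def pvGood (md : Int) (t : Int × Int × Int) : Bool :=
  decide (0 < pvD t) && decide (pvD t ≤ md) && !pv_is_perfect_square (pvD t)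
    && !pv_has_rational_root t.1 t.2.1 t.2.2

def pvE (mc : Int) : List (Int × Int × Int) :=
  ([-1, 0, 1] : List Int).flatMap (fun c2 =>
    (PySem.List.pyRange (-mc) (mc + 1) 1).flatMap (fun c1 =>
      (PySem.List.pyRange (-mc) (mc + 1) 1).map (fun c0 => (c2, c1, c0))))

def pvS (md mc : Int) : List (Int × Int × Int) := (pvE mc).filter (pvGood md)

def pvKeyT (t : Int × Int × Int) : Int ×ₗ (Int ×ₗ Int) := toLex (t.1, toLex (t.2.1, t.2.2))

def pvAdd (t : Int × Int × Int) : Int × Int × Int × Int := (t.1, t.2.1, t.2.2, pvD t)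

def pvPair (t : Int × Int × Int) : Int × (Int × Int × Int) := (pvD t, t)

def pvToPair (x : Int × Int × Int × Int) : Int × (Int × Int × Int) :=
  (x.2.2.2, (x.1, x.2.1, x.2.2.1))

-- dedup-keeping-first-by-key, the common shape of A's seen-set pass and B's dict build
def ddk {α : Type} (key : α → Int) : List α → List Int → List α
  | [], _ => []
  | x :: l, seen => if key x ∈ seen then ddk key l seen else x :: ddk key l (key x :: seen)

theorem ddk_sublist {α : Type} (key : α → Int) (l : List α) (seen : List Int) :
    (ddk key l seen).Sublist l := by
  induction l generalizing seen with
  | nil => simp [ddk]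
  | cons x l ih =>
    simp only [ddk]
    split
    · exact (ih seen).trans (List.sublist_cons_self x l)
    · exact (ih (key x :: seen)).cons₂ x

theorem ddk_congr {α : Type} (key : α → Int) (l : List α) {s₁ s₂ : List Int}
    (h : ∀ k, k ∈ s₁ ↔ k ∈ s₂) : ddk key l s₁ = ddk key l s₂ := by
  induction l generalizing s₁ s₂ with
  | nil => rfl
  | cons x l ih =>
    simp only [ddk]
    by_cases hx : key x ∈ s₁
    · rw [if_pos hx, if_pos ((h _).mp hx)]
      exact ih h
    · rw [if_neg hx, if_neg (fun hc => hx ((h _).mpr hc))]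
      refine congrArg _ (ih fun k => ?_)
      simp [h k]

theorem ddk_mem {α : Type} {κ : Type} [LinearOrder κ] (key : α → Int) (m : α → κ)
    (l : List α) (hl : l.Pairwise (fun a b => m a < m b)) (seen : List Int) (x : α) :
    x ∈ ddk key l seen ↔ x ∈ l ∧ key x ∉ seen ∧ ∀ y ∈ l, key y = key x → m x ≤ m y := by
  induction l generalizing seen with
  | nil => simp [ddk]
  | cons a l ih =>
    obtain ⟨ha, hl⟩ := List.pairwise_cons.mp hl
    simp only [ddk]
    by_cases hk : key a ∈ seen
    · rw [if_pos hk, ih hl seen]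
      constructor
      · rintro ⟨h1, h2, h3⟩
        refine ⟨List.mem_cons_of_mem a h1, h2, ?_⟩
        intro y hy hkey
        rcases List.mem_cons.mp hy with rfl | hy'
        · exact absurd (hkey ▸ hk) h2
        · exact h3 y hy' hkey
      · rintro ⟨h1, h2, h3⟩
        rcases List.mem_cons.mp h1 with rfl | h1'
        · exact absurd hk h2
        · exact ⟨h1', h2, fun y hy hkey => h3 y (List.mem_cons_of_mem a hy) hkey⟩
    · rw [if_neg hk]
      by_cases hxa : x = a
      · subst hxa
        refine iff_of_true List.mem_cons_self ⟨List.mem_cons_self, hk, ?_⟩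
        intro y hy _
        rcases List.mem_cons.mp hy with rfl | hy'
        · exact le_refl _
        · exact le_of_lt (ha y hy')
      · have LHS : x ∈ a :: ddk key l (key a :: seen) ↔ x ∈ ddk key l (key a :: seen) := by
          simp [List.mem_cons, hxa]
        rw [LHS, ih hl (key a :: seen)]
        constructor
        · rintro ⟨h1, h2, h3⟩
          refine ⟨List.mem_cons_of_mem a h1, fun hc => h2 (List.mem_cons_of_mem _ hc), ?_⟩
          intro y hy hkey
          rcases List.mem_cons.mp hy with rfl | hy'
          · exact absurd (List.mem_cons.mpr (Or.inl hkey.symm)) h2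
          · exact h3 y hy' hkey
        · rintro ⟨h1, h2, h3⟩
          rcases List.mem_cons.mp h1 with rfl | h1'
          · exact absurd rfl hxa
          · refine ⟨h1', ?_, fun y hy hkey => h3 y (List.mem_cons_of_mem a hy) hkey⟩
            intro hc
            rcases List.mem_cons.mp hc with heq | hin
            · have hle := h3 a List.mem_cons_self heq.symm
              exact absurd (ha x h1') (not_lt.mpr hle)
            · exact h2 hin

theorem pvE_pairwise (mc : Int) : (pvE mc).Pairwise (fun a b => pvKeyT a < pvKeyT b) := by
  unfold pvE
  rw [List.pairwise_flatMap]
  refine ⟨fun c2 _ => ?_, ?_⟩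
  · rw [List.pairwise_flatMap]
    refine ⟨fun c1 _ => ?_, ?_⟩
    · rw [List.pairwise_map]
      refine (PySem.List.pairwise_lt_pyRange_one _ _).imp ?_
      intro a b hab
      simp [pvKeyT, Prod.Lex.toLex_lt_toLex, hab]
    · refine (PySem.List.pairwise_lt_pyRange_one _ _).imp ?_
      intro a b hab x hx y hy
      simp only [List.mem_map] at hx hy
      obtain ⟨c0, _, rfl⟩ := hx
      obtain ⟨c0', _, rfl⟩ := hy
      simp [pvKeyT, Prod.Lex.toLex_lt_toLex, hab]
  · have h3 : ([-1, 0, 1] : List Int).Pairwise (· < ·) := by decide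
    refine h3.imp ?_
    intro a b hab x hx y hy
    simp only [List.mem_flatMap, List.mem_map] at hx hy
    obtain ⟨c1, _, c0, _, rfl⟩ := hx
    obtain ⟨c1', _, c0', _, rfl⟩ := hy
    simp [pvKeyT, Prod.Lex.toLex_lt_toLex, hab]

theorem pvS_pairwise (md mc : Int) : (pvS md mc).Pairwise (fun a b => pvKeyT a < pvKeyT b) := by
  exact (pvE_pairwise mc).sublist List.filter_sublist

theorem pvS_nodup (md mc : Int) : (pvS md mc).Nodup := by
  refine (pvS_pairwise md mc).imp ?_
  intro a b hab
  exact fun h => absurd hab (h ▸ lt_irrefl _)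

theorem pvAdd_inj : Function.Injective pvAdd := by
  rintro ⟨a1, a2, a3⟩ ⟨b1, b2, b3⟩ h
  simp only [pvAdd, Prod.mk.injEq] at h
  simp [h.1, h.2.1, h.2.2.1]

theorem pvToPair_inj : Function.Injective pvToPair := by
  rintro ⟨a1, a2, a3, a4⟩ ⟨b1, b2, b3, b4⟩ h
  simp only [pvToPair, Prod.mk.injEq] at h
  simp [h.1, h.2.1, h.2.2.1, h.2.2.2]

theorem pvKeyA_inj : Function.Injective pvKeyA := by
  rintro ⟨a1, a2, a3, a4⟩ ⟨b1, b2, b3, b4⟩ h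
  simp only [pvKeyA, toLex_inj, Prod.mk.injEq] at h
  simp [h.1, h.2.1, h.2.2.1, h.2.2.2]

-- A's seen-set dedup loop is ddk on the discriminant
theorem dedupA_eq (l : List (Int × Int × Int × Int)) (u : List (Int × Int × Int × Int))
    (s : List Int) :
    (l.foldl (fun (acc : List (Int × Int × Int × Int) × PySem.Set Int) x =>
      if PySem.Set.contains acc.2 x.2.2.2 then acc
      else (acc.1 ++ [x], PySem.Set.add acc.2 x.2.2.2)) (u, s)).1
      = u ++ ddk (fun x => x.2.2.2) l s := by
  induction l generalizing u s with
  | nil => simp [ddk]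
  | cons x l ih =>
    simp only [List.foldl_cons, ddk]
    by_cases h : x.2.2.2 ∈ s
    · have hc : PySem.Set.contains s x.2.2.2 = true := (PySem.Set.contains_iff s _).mpr h
      rw [if_pos h]
      simp only [hc, if_true]
      exact ih u s
    · have hc : PySem.Set.contains s x.2.2.2 = false :=
        Bool.eq_false_iff.mpr (fun ht => h ((PySem.Set.contains_iff s _).mp ht))
      rw [if_neg h]
      simp only [hc, Bool.false_eq_true, if_false]
      have hadd : PySem.Set.add s x.2.2.2 = s ++ [x.2.2.2] := by
        simp [PySem.Set.add, h]
      rw [hadd, ih (u ++ [x]) (s ++ [x.2.2.2]),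
        ddk_congr (fun y => y.2.2.2) l (s₁ := s ++ [x.2.2.2]) (s₂ := x.2.2.2 :: s)
          (fun k => by simp [or_comm])]
      simp

theorem pvGood_iff (md : Int) (t : Int × Int × Int) :
    pvGood md t = true ↔ 0 < pvD t ∧ pvD t ≤ md ∧ pv_is_perfect_square (pvD t) = false
      ∧ pv_has_rational_root t.1 t.2.1 t.2.2 = false := by
  simp only [pvGood, Bool.and_eq_true, decide_eq_true_eq, Bool.not_eq_true']
  tauto

theorem bodyEqA (md c2 c1 : Int) (results : List (Int × Int × Int × Int)) (c0 : Int) :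
    (let disc := pv_disc_cubic c2 c1 c0
     if disc ≤ 0 ∨ disc > md then results
     else if pv_is_perfect_square disc then results
     else if pv_has_rational_root c2 c1 c0 then results
     else results ++ [(c2, c1, c0, disc)])
    = if pvGood md (c2, c1, c0) then results ++ [pvAdd (c2, c1, c0)] else results := by
  show (if pv_disc_cubic c2 c1 c0 ≤ 0 ∨ pv_disc_cubic c2 c1 c0 > md then results
     else if pv_is_perfect_square (pv_disc_cubic c2 c1 c0) then results
     else if pv_has_rational_root c2 c1 c0 then results
     else results ++ [(c2, c1, c0, pv_disc_cubic c2 c1 c0)]) = _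
  by_cases hg : pvGood md (c2, c1, c0) = true
  · obtain ⟨g1, g2, g3, g4⟩ := (pvGood_iff md _).mp hg
    simp only [pvD] at g1 g2 g3 g4
    rw [if_pos hg, if_neg (by omega), if_neg (by simp [g3]), if_neg (by simp [g4])]
    simp [pvAdd, pvD]
  · rw [if_neg hg]
    split_ifs with h1 h2 h3
    · rfl
    · rfl
    · rfl
    · exact absurd ((pvGood_iff md _).mpr
        ⟨by simp only [pvD]; omega, by simp only [pvD]; omega,
         by simpa using h2, by simpa using h3⟩) hg

-- A's port, in closed form
theorem A_eq (md mc : Int) :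
    find_non_cyclic_cubics md mc
      = ddk (fun x => x.2.2.2)
          (PySem.List.sorted ((pvS md mc).map pvAdd) pvKeyA false) [] := by
  unfold find_non_cyclic_cubics
  have h1 : ∀ (c2 c1 : Int) (res : List (Int × Int × Int × Int)),
      ((PySem.List.pyRange (-mc) (mc + 1) 1).foldl (fun results c0 =>
        let disc := pv_disc_cubic c2 c1 c0
        if disc ≤ 0 ∨ disc > md then results
        else if pv_is_perfect_square disc then results
        else if pv_has_rational_root c2 c1 c0 then results
        else results ++ [(c2, c1, c0, disc)]) res)
      = res ++ ((PySem.List.pyRange (-mc) (mc + 1) 1).filter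
          (fun c0 => pvGood md (c2, c1, c0))).map (fun c0 => pvAdd (c2, c1, c0)) := by
    intro c2 c1 res
    rw [PySem.List.foldl_congr_mem
      (f := fun results c0 =>
        let disc := pv_disc_cubic c2 c1 c0
        if disc ≤ 0 ∨ disc > md then results
        else if pv_is_perfect_square disc then results
        else if pv_has_rational_root c2 c1 c0 then results
        else results ++ [(c2, c1, c0, disc)])
      (g := fun results c0 =>
        if pvGood md (c2, c1, c0) then results ++ [pvAdd (c2, c1, c0)] else results)
      _ _ (fun acc c0 _ => bodyEqA md c2 c1 acc c0)]
    exact PySem.List.foldl_append_if _ _ _ _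
  have h2 : ∀ (c2 : Int) (res : List (Int × Int × Int × Int)),
      ((PySem.List.pyRange (-mc) (mc + 1) 1).foldl (fun results c1 =>
        (PySem.List.pyRange (-mc) (mc + 1) 1).foldl (fun results c0 =>
          let disc := pv_disc_cubic c2 c1 c0
          if disc ≤ 0 ∨ disc > md then results
          else if pv_is_perfect_square disc then results
          else if pv_has_rational_root c2 c1 c0 then results
          else results ++ [(c2, c1, c0, disc)]) results) res)
      = res ++ (PySem.List.pyRange (-mc) (mc + 1) 1).flatMap (fun c1 =>
          ((PySem.List.pyRange (-mc) (mc + 1) 1).filter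
            (fun c0 => pvGood md (c2, c1, c0))).map (fun c0 => pvAdd (c2, c1, c0))) := by
    intro c2 res
    rw [PySem.List.foldl_congr_mem
      (f := fun results c1 =>
        (PySem.List.pyRange (-mc) (mc + 1) 1).foldl (fun results c0 =>
          let disc := pv_disc_cubic c2 c1 c0
          if disc ≤ 0 ∨ disc > md then results
          else if pv_is_perfect_square disc then results
          else if pv_has_rational_root c2 c1 c0 then results
          else results ++ [(c2, c1, c0, disc)]) results)
      (g := fun results c1 => results ++
        ((PySem.List.pyRange (-mc) (mc + 1) 1).filter
          (fun c0 => pvGood md (c2, c1, c0))).map (fun c0 => pvAdd (c2, c1, c0)))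
      _ _ (fun acc c1 _ => h1 c2 c1 acc)]
    exact PySem.List.foldl_append_eq_flatMap _ _ _
  have hR : (([-1, 0, 1] : List Int).foldl (fun results c2 =>
      (PySem.List.pyRange (-mc) (mc + 1) 1).foldl (fun results c1 =>
        (PySem.List.pyRange (-mc) (mc + 1) 1).foldl (fun results c0 =>
          let disc := pv_disc_cubic c2 c1 c0
          if disc ≤ 0 ∨ disc > md then results
          else if pv_is_perfect_square disc then results
          else if pv_has_rational_root c2 c1 c0 then results
          else results ++ [(c2, c1, c0, disc)]) results) results) [])
      = (pvS md mc).map pvAdd := by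
    rw [PySem.List.foldl_congr_mem
      (f := fun results c2 =>
        (PySem.List.pyRange (-mc) (mc + 1) 1).foldl (fun results c1 =>
          (PySem.List.pyRange (-mc) (mc + 1) 1).foldl (fun results c0 =>
            let disc := pv_disc_cubic c2 c1 c0
            if disc ≤ 0 ∨ disc > md then results
            else if pv_is_perfect_square disc then results
            else if pv_has_rational_root c2 c1 c0 then results
            else results ++ [(c2, c1, c0, disc)]) results) results)
      (g := fun results c2 => results ++
        (PySem.List.pyRange (-mc) (mc + 1) 1).flatMap (fun c1 =>
          ((PySem.List.pyRange (-mc) (mc + 1) 1).filter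
            (fun c0 => pvGood md (c2, c1, c0))).map (fun c0 => pvAdd (c2, c1, c0))))
      _ _ (fun acc c2 _ => h2 c2 acc),
      PySem.List.foldl_append_eq_flatMap]
    simp [pvS, pvE, List.filter_flatMap, List.map_flatMap, List.filter_map,
      Function.comp_def]
  simp only [hR]
  rw [dedupA_eq]
  simp

-- B's dict-building loop is ddk on the key of the survivor pairs
theorem dictB_eq (md : Int) (l : List (Int × Int × Int)) (d : PySem.Dict Int (Int × Int × Int)) :
    (l.foldl (fun (best : PySem.Dict Int (Int × Int × Int)) t =>
      if 0 < pvD t ∧ pvD t ≤ md ∧ best.contains (pvD t) = false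
          ∧ pv_is_perfect_square (pvD t) = false ∧ pv_has_rational_root t.1 t.2.1 t.2.2 = false
      then best.insert (pvD t) (t.1, t.2.1, t.2.2) else best) d).items
      = d.items ++ ddk Prod.fst ((l.filter (pvGood md)).map pvPair) d.keys := by
  induction l generalizing d with
  | nil => simp [ddk]
  | cons t l ih =>
    simp only [List.foldl_cons, List.filter_cons]
    by_cases hg : pvGood md t = true
    · obtain ⟨h1, h2, h3, h4⟩ := (pvGood_iff md t).mp hg
      rw [if_pos hg]
      simp only [List.map_cons, ddk]
      by_cases hc : d.contains (pvD t) = true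
      · rw [if_neg (fun hcond => by rw [hc] at hcond; exact absurd hcond.2.2.1 (by simp))]
        have hmem : (pvPair t).1 ∈ d.keys := (PySem.Dict.contains_iff_mem_keys d _).mp hc
        rw [if_pos hmem]
        exact ih d
      · have hc' : d.contains (pvD t) = false := Bool.eq_false_iff.mpr hc
        rw [if_pos ⟨h1, h2, hc', h3, h4⟩]
        have hnm : (pvPair t).1 ∉ d.keys := fun hm =>
          hc ((PySem.Dict.contains_iff_mem_keys d _).mpr hm)
        rw [if_neg hnm, ih (d.insert (pvD t) (t.1, t.2.1, t.2.2)),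
          PySem.Dict.items_insert_of_not_contains d _ hc',
          PySem.Dict.keys_insert_of_not_contains d _ hc',
          ddk_congr Prod.fst _ (s₁ := d.keys ++ [pvD t]) (s₂ := pvD t :: d.keys)
            (fun k => by simp [or_comm])]
        simp [pvPair]
    · rw [if_neg hg, if_neg (fun hcond => hg ((pvGood_iff md t).mpr
        ⟨hcond.1, hcond.2.1, hcond.2.2.2.1, hcond.2.2.2.2⟩))]
      exact ih d

-- B's port, in closed form
theorem B_eq (md mc : Int) :
    find_non_cyclic_cubics_alt md mc
      = (PySem.List.sorted (ddk Prod.fst ((pvS md mc).map pvPair) []) pvKeyB false).map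
          (fun p => (p.2.1, p.2.2.1, p.2.2.2, p.1)) := by
  unfold find_non_cyclic_cubics_alt
  have hd : (([-1, 0, 1] : List Int).foldl (fun best c2 =>
      (PySem.List.pyRange (-mc) (mc + 1) 1).foldl (fun best c1 =>
        (PySem.List.pyRange (-mc) (mc + 1) 1).foldl (fun best c0 =>
          let disc := pv_disc_cubic c2 c1 c0
          if 0 < disc ∧ disc ≤ md ∧ best.contains disc = false
              ∧ pv_is_perfect_square disc = false ∧ pv_has_rational_root c2 c1 c0 = false
          then best.insert disc (c2, c1, c0) else best) best) best) PySem.Dict.empty)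
      = (pvE mc).foldl (fun (best : PySem.Dict Int (Int × Int × Int)) t =>
          if 0 < pvD t ∧ pvD t ≤ md ∧ best.contains (pvD t) = false
              ∧ pv_is_perfect_square (pvD t) = false
              ∧ pv_has_rational_root t.1 t.2.1 t.2.2 = false
          then best.insert (pvD t) (t.1, t.2.1, t.2.2) else best) PySem.Dict.empty := by
    rw [pvE, List.foldl_flatMap]
    refine PySem.List.foldl_congr_mem _ _ _ _ (fun acc c2 _ => ?_) |>.symm
    rw [List.foldl_flatMap]
    refine PySem.List.foldl_congr_mem _ _ _ _ (fun acc2 c1 _ => ?_) |>.symm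
    rw [List.foldl_map]
    rfl
  simp only [hd, dictB_eq]
  simp [pvS, show (PySem.Dict.empty : PySem.Dict Int (Int × Int × Int)).items = [] from rfl]

theorem pvPair_inj : Function.Injective pvPair :=
  fun _ _ h => congrArg Prod.snd h

theorem pvKeyA_pvAdd (t : Int × Int × Int) :
    pvKeyA (pvAdd t) = toLex (pvD t, pvKeyT t) := rfl

theorem main_eq (md mc : Int) :
    find_non_cyclic_cubics md mc = find_non_cyclic_cubics_alt md mc := by
  have hSpw := pvS_pairwise md mc
  have hSnd := pvS_nodup md mc
  have hR4nd : ((pvS md mc).map pvAdd).Nodup := hSnd.map pvAdd_inj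
  have hLAperm : (PySem.List.sorted ((pvS md mc).map pvAdd) pvKeyA false).Perm
      ((pvS md mc).map pvAdd) := PySem.List.sorted_perm _ _ _
  have hLAnd : (PySem.List.sorted ((pvS md mc).map pvAdd) pvKeyA false).Nodup :=
    hLAperm.nodup_iff.mpr hR4nd
  have hLApw : (PySem.List.sorted ((pvS md mc).map pvAdd) pvKeyA false).Pairwise
      (fun a b => pvKeyA a < pvKeyA b) := by
    have h1 := PySem.List.sorted_pairwise ((pvS md mc).map pvAdd) pvKeyA
    exact (h1.and hLAnd).imp
      (fun h => lt_of_le_of_ne h.1 (fun he => h.2 (pvKeyA_inj he)))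
  have hmemLA : ∀ x, x ∈ PySem.List.sorted ((pvS md mc).map pvAdd) pvKeyA false
      ↔ x ∈ (pvS md mc).map pvAdd := fun x => hLAperm.mem_iff
  have hFinal := fun x => ddk_mem (fun y => y.2.2.2) pvKeyA
    (PySem.List.sorted ((pvS md mc).map pvAdd) pvKeyA false) hLApw [] x
  have hpairspw : ((pvS md mc).map pvPair).Pairwise
      (fun p q => pvKeyT p.2 < pvKeyT q.2) := (List.pairwise_map).mpr hSpw
  have hP := fun p => ddk_mem Prod.fst (fun p => pvKeyT p.2)
    ((pvS md mc).map pvPair) hpairspw [] p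
  have hpairsnd : ((pvS md mc).map pvPair).Nodup := hSnd.map pvPair_inj
  have hPnd : (ddk Prod.fst ((pvS md mc).map pvPair) []).Nodup :=
    (ddk_sublist _ _ _).nodup hpairsnd
  have hFinalpw : (ddk (fun y => y.2.2.2)
      (PySem.List.sorted ((pvS md mc).map pvAdd) pvKeyA false) []).Pairwise
      (fun a b => pvKeyA a < pvKeyA b) := hLApw.sublist (ddk_sublist _ _ _)
  have hcond : ∀ t ∈ pvS md mc,
      ((∀ y ∈ (pvS md mc).map pvAdd, y.2.2.2 = pvD t → pvKeyA (pvAdd t) ≤ pvKeyA y)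
        ↔ (∀ u ∈ pvS md mc, pvD u = pvD t → pvKeyT t ≤ pvKeyT u)) := by
    intro t ht
    constructor
    · intro h u hu hdu
      have h2 := h (pvAdd u) (List.mem_map_of_mem hu) hdu
      rw [pvKeyA_pvAdd, pvKeyA_pvAdd, Prod.Lex.toLex_le_toLex] at h2
      rcases h2 with h2 | h2
      · rw [hdu] at h2; exact absurd h2 (lt_irrefl _)
      · exact h2.2
    · intro h y hy hdy
      obtain ⟨u, hu, rfl⟩ := List.mem_map.mp hy
      have hdu : pvD u = pvD t := hdy
      rw [pvKeyA_pvAdd, pvKeyA_pvAdd, Prod.Lex.toLex_le_toLex]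
      exact Or.inr ⟨hdu.symm, h u hu hdu⟩
  have hmem : ∀ p, p ∈ (ddk (fun y => y.2.2.2)
        (PySem.List.sorted ((pvS md mc).map pvAdd) pvKeyA false) []).map pvToPair
      ↔ p ∈ ddk Prod.fst ((pvS md mc).map pvPair) [] := by
    intro p
    rw [List.mem_map, hP p]
    constructor
    · rintro ⟨x, hx, rfl⟩
      obtain ⟨hxLA, -, hcondx⟩ := (hFinal x).mp hx
      obtain ⟨t, ht, rfl⟩ := List.mem_map.mp ((hmemLA x).mp hxLA)
      have hct := (hcond t ht).mp (fun y hy => hcondx y ((hmemLA y).mpr hy))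
      refine ⟨List.mem_map_of_mem ht, by simp, ?_⟩
      intro q hq hq1
      obtain ⟨u, hu, rfl⟩ := List.mem_map.mp hq
      exact hct u hu hq1
    · rintro ⟨hp, -, hcondp⟩
      obtain ⟨t, ht, rfl⟩ := List.mem_map.mp hp
      refine ⟨pvAdd t, ?_, rfl⟩
      rw [hFinal (pvAdd t)]
      refine ⟨(hmemLA _).mpr (List.mem_map_of_mem ht), by simp, ?_⟩
      intro y hy hdy
      exact (hcond t ht).mpr
        (fun u hu hdu => hcondp (pvPair u) (List.mem_map_of_mem hu) hdu)
        y ((hmemLA y).mp hy) hdy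
  have hFnd : ((ddk (fun y => y.2.2.2)
      (PySem.List.sorted ((pvS md mc).map pvAdd) pvKeyA false) []).map pvToPair).Nodup :=
    ((ddk_sublist _ _ _).nodup hLAnd).map pvToPair_inj
  have hperm := (List.perm_ext_iff_of_nodup hFnd hPnd).mpr hmem
  have hpwB : ((ddk (fun y => y.2.2.2)
      (PySem.List.sorted ((pvS md mc).map pvAdd) pvKeyA false) []).map pvToPair).Pairwise
      (fun p q => pvKeyB p < pvKeyB q) := (List.pairwise_map).mpr hFinalpw
  have hsorted : PySem.List.sorted (ddk Prod.fst ((pvS md mc).map pvPair) []) pvKeyB false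
      = (ddk (fun y => y.2.2.2)
          (PySem.List.sorted ((pvS md mc).map pvAdd) pvKeyA false) []).map pvToPair := by
    apply PySem.List.sorted_eq_of_perm_of_pairwise_lt
    · exact hperm
    · exact hpwB
  rw [A_eq, B_eq, hsorted, List.map_map]
  have hid : ((fun (p : Int × (Int × Int × Int)) => (p.2.1, p.2.2.1, p.2.2.2, p.1)) ∘ pvToPair)
      = id := funext fun ⟨_, _, _, _⟩ => rfl
  rw [hid, List.map_id]

-- ===== VERDICT (by name: the statement is the Claim_ definition above) =====
theorem find_non_cyclic_cubics_spec : Claim_equal_find_non_cyclic_cubics := by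
  intro md mc _
  unfold Spec_find_non_cyclic_cubics
  exact main_eq md mc
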